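-- pv_equiv track=rewrite | github.com/tekichan/pdf_extractor | python/lang_utils.py | merge_hyphen_words
-- ===== SOURCE A (Python) =====
-- def merge_hyphen_words(word_tokens):
--     idx = 0
--     new_word_list = list()
--     while idx < len(word_tokens):
--         current_word = word_tokens[idx]
--         while idx + 1 < len(word_tokens) and \
--             (current_word.endswith('-') or word_tokens[idx+1].startswith('-')):
--             current_word = current_word + word_tokens[idx+1]
--             idx += 1
--         new_word_list.append(current_word)
--         idx += 1
--     return new_word_list
-- ===== SOURCE B (Python) =====
-- def merge_hyphen_words(word_tokens):
--     result = []
--     for t in word_tokens: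
--         if result and (result[-1].endswith('-') or t.startswith('-')):
--             result[-1] = result[-1] + t
--         else:
--             result.append(t)
--     return result
-- ===== Notes on version B (the rewrite author's own statement) =====
-- stated objective: simpler
-- what changed: Replaced the nested while-loops with manual index arithmetic by a single for-loop over the tokens that either merges each token into the last element of the result list or appends it.
import Mathlib
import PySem

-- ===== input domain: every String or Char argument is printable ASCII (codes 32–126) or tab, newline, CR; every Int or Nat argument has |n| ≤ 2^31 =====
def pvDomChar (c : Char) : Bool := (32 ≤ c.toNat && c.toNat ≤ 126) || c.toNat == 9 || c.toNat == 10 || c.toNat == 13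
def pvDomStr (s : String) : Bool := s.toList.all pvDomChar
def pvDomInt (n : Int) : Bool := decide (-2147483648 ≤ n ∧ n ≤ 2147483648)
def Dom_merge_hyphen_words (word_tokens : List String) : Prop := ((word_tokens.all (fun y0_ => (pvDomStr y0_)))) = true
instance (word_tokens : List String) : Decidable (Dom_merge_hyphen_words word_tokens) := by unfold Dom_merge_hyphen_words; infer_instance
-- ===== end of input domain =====

-- ===== PORT A =====
-- A: nested while loops; inner loop accumulates into current_word while the hyphen condition holds
def mergeA_loop : String → List String → List String
  | cur, [] => [cur]
  | cur, t :: rs =>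
    if PySem.Str.endswith cur "-" || PySem.Str.startswith t "-" then
      mergeA_loop (cur ++ t) rs
    else
      cur :: mergeA_loop t rs

def merge_hyphen_words (word_tokens : List String) : List String :=
  match word_tokens with
  | [] => []
  | w :: ws => mergeA_loop w ws

-- ===== PORT B =====
-- B: one forward pass over the tokens, merging into or appending to the result list
def mergeB_step (res : List String) (t : String) : List String :=
  match res.getLast? with
  | none => res ++ [t]
  | some last =>
    if PySem.Str.endswith last "-" || PySem.Str.startswith t "-" then
      res.dropLast ++ [last ++ t]
    else
      res ++ [t]

def merge_hyphen_words_alt (word_tokens : List String) : List String :=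
  word_tokens.foldl mergeB_step []

-- ===== PRECONDITION & SPEC =====
def Spec_merge_hyphen_words (word_tokens : List String) (out : List String) : Prop := out = merge_hyphen_words_alt word_tokens
instance (word_tokens : List String) (out : List String) : Decidable (Spec_merge_hyphen_words word_tokens out) := by unfold Spec_merge_hyphen_words; infer_instance

-- ===== CLAIM (what is proved, stated in full; the proofs are below) =====
def Claim_equal_merge_hyphen_words : Prop := ∀ (word_tokens : List String), Dom_merge_hyphen_words word_tokens → Spec_merge_hyphen_words word_tokens (merge_hyphen_words word_tokens)

-- ===== LEMMAS AND PROOFS =====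

-- ===== VERDICT (by name: the statement is the Claim_ definition above) =====
theorem foldB_inv (rest : List String) (cur : String) (pre : List String) :
    rest.foldl mergeB_step (pre ++ [cur]) = pre ++ mergeA_loop cur rest := by
  induction rest generalizing cur pre with
  | nil => simp [mergeA_loop]
  | cons t rs ih =>
    simp only [List.foldl_cons, mergeB_step, List.getLast?_append, List.getLast?_singleton,
      Option.some_or, List.dropLast_concat, mergeA_loop]
    split
    · exact ih (cur ++ t) pre
    · rw [show pre ++ [cur] ++ [t] = (pre ++ [cur]) ++ [t] from rfl, ih t (pre ++ [cur])]
      simp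

theorem merge_hyphen_words_spec : Claim_equal_merge_hyphen_words := by
  intro ts _
  unfold Spec_merge_hyphen_words merge_hyphen_words merge_hyphen_words_alt
  cases ts with
  | nil => rfl
  | cons w ws =>
    simpa using (foldB_inv ws w []).symm
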